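-- pv_equiv track=rewrite | github.com/sofyagdk/euplotes | analyze_fs_evolution/evolution/site_module_local.py | cut_firstfew
-- ===== SOURCE A (Python) =====
-- def cut_firstfew(seq):
-- 	nom = [0, 1, 2]
-- 	for i in range(0, len(seq), 3):
-- 		if seq[i:i+3] in ['TAA', 'TAG']:
-- 			nom.remove(0)
-- 			break
-- 	for i in range(1, len(seq), 3):
-- 		if seq[i:i+3] in ['TAA', 'TAG']:
-- 			nom.remove(1)
-- 			break
-- 	for i in range(2, len(seq), 3):
-- 		if seq[i:i+3] in ['TAA', 'TAG']:
-- 			nom.remove(2)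
-- 			break
--
-- 	return int(nom[0])
-- ===== SOURCE B (Python) =====
-- def cut_firstfew(seq):
--     stopped = set()
--     for i in range(len(seq)):
--         if seq[i:i+3] in ('TAA', 'TAG'):
--             stopped.add(i % 3)
--     return [f for f in (0, 1, 2) if f not in stopped][0]
-- ===== Notes on version B (the rewrite author's own statement) =====
-- stated objective: simpler
-- what changed: Three independent early-breaking scans with list.remove bookkeeping are replaced by one pass over all indices collecting the frames (i % 3) that contain a stop codon into a set, then returning the first frame not in the set.
import Mathlib
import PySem

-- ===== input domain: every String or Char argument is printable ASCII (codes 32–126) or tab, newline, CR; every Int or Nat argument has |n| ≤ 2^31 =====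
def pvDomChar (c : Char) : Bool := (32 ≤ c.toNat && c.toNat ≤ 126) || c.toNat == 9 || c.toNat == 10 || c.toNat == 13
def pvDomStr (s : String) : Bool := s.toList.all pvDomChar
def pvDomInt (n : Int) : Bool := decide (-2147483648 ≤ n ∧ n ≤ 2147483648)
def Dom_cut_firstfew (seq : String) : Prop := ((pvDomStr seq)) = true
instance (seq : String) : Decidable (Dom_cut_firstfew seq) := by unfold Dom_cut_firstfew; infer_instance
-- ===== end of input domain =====

-- B replaces A's three early-breaking per-frame scans (with list.remove bookkeeping) by a
-- single pass collecting the stopped frames (i % 3) into a set; objective: simpler.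

-- 'seq[i:i+3] in ['TAA', 'TAG']' — shared transliteration of the identical test in A and B
def pvIsStop (cs : List Char) (i : Int) : Bool :=
  decide (PySem.List.slice cs (some i) (some (i + 3)) ∈ ["TAA".toList, "TAG".toList])

-- ===== PORT A =====
-- one 'for i in range(f, len(seq), 3): if stop: nom.remove(f); break' loop
def pvScanA (cs : List Char) (idxs : List Int) (nom : List Int) (f : Int) : List Int :=
  match idxs with
  | [] => nom
  | i :: rest =>
      if pvIsStop cs i then (PySem.List.remove? nom f).getD nom   -- remove and break
      else pvScanA cs rest nom f

def cut_firstfew (seq : String) : Int :=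
  let cs := seq.toList
  let n : Int := cs.length
  let nom0 : List Int := [0, 1, 2]
  let nom1 := pvScanA cs (PySem.List.pyRange 0 n 3) nom0 0
  let nom2 := pvScanA cs (PySem.List.pyRange 1 n 3) nom1 1
  let nom3 := pvScanA cs (PySem.List.pyRange 2 n 3) nom2 2
  (PySem.List.pyGet? nom3 0).getD 0   -- nom[0]; IndexError (none) excluded by Pre_

-- ===== PORT B =====
def cut_firstfew_alt (seq : String) : Int :=
  let cs := seq.toList
  let stopped : PySem.Set Int :=
    (PySem.List.pyRange 0 (cs.length : Int) 1).foldl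
      (fun s i => if pvIsStop cs i then PySem.Set.add s (PySem.Int.mod i 3) else s)
      PySem.Set.empty
  let cands := ([0, 1, 2] : List Int).filter (fun f => !(PySem.Set.contains stopped f))
  (PySem.List.pyGet? cands 0).getD 0   -- [...][0]; IndexError (none) excluded by Pre_

-- ===== PRECONDITION & SPEC =====
-- Pre_ excludes exactly the inputs where every reading frame contains a stop codon:
-- there both Pythons raise IndexError (nom / the comprehension is empty).
def Pre_cut_firstfew (seq : String) : Prop :=
  ∃ f ∈ ([0, 1, 2] : List Int),
    ∀ i ∈ PySem.List.pyRange 0 (seq.toList.length : Int) 1,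
      ¬(pvIsStop seq.toList i = true ∧ PySem.Int.mod i 3 = f)
instance (seq : String) : Decidable (Pre_cut_firstfew seq) := by
  unfold Pre_cut_firstfew; infer_instance

def pvWitness_cut_firstfew : String := "ATGTAAC"

def Spec_cut_firstfew (seq : String) (out : Int) : Prop := out = cut_firstfew_alt seq
instance (seq : String) (out : Int) : Decidable (Spec_cut_firstfew seq out) := by
  unfold Spec_cut_firstfew; infer_instance

-- ===== CLAIM (what is proved, stated in full; the proofs are below) =====
def Claim_equal_cut_firstfew : Prop :=
  ∀ (seq : String), Dom_cut_firstfew seq → Pre_cut_firstfew seq →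
    Spec_cut_firstfew seq (cut_firstfew seq)

-- ===== LEMMAS AND PROOFS =====

-- A's loop removes f iff some index in its range is a stop position
theorem pvScanA_eq (cs : List Char) (idxs : List Int) (nom : List Int) (f : Int) :
    pvScanA cs idxs nom f =
      if idxs.any (pvIsStop cs) then (PySem.List.remove? nom f).getD nom else nom := by
  induction idxs with
  | nil => simp [pvScanA]
  | cons i rest ih =>
      simp only [pvScanA, List.any_cons]
      by_cases h : pvIsStop cs i = true <;> simp [h, ih]

-- membership in B's fold-built set
theorem pv_mem_foldl (cs : List Char) (l : List Int) (s : PySem.Set Int) (x : Int) :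
    (x ∈ l.foldl
        (fun s i => if pvIsStop cs i then PySem.Set.add s (PySem.Int.mod i 3) else s) s)
      ↔ x ∈ s ∨ ∃ i ∈ l, pvIsStop cs i = true ∧ PySem.Int.mod i 3 = x := by
  induction l generalizing s with
  | nil => simp
  | cons i rest ih =>
      simp only [List.foldl_cons, List.mem_cons]
      by_cases h : pvIsStop cs i = true
      · rw [if_pos h, ih, PySem.Set.mem_add]
        constructor
        · rintro ((h1 | h1) | h2)
          · exact Or.inl h1
          · exact Or.inr ⟨i, Or.inl rfl, h, h1.symm⟩
          · obtain ⟨j, hj, hs, hm⟩ := h2; exact Or.inr ⟨j, Or.inr hj, hs, hm⟩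
        · rintro (h1 | ⟨j, (rfl | hj), hs, hm⟩)
          · exact Or.inl (Or.inl h1)
          · exact Or.inl (Or.inr hm.symm)
          · exact Or.inr ⟨j, hj, hs, hm⟩
      · rw [if_neg h, ih]
        constructor
        · rintro (h1 | ⟨j, hj, hs, hm⟩)
          · exact Or.inl h1
          · exact Or.inr ⟨j, Or.inr hj, hs, hm⟩
        · rintro (h1 | ⟨j, (rfl | hj), hs, hm⟩)
          · exact Or.inl h1
          · exact absurd hs h
          · exact Or.inr ⟨j, hj, hs, hm⟩

-- A's frame-f range membership vs (i % 3 = f) over the full index range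
theorem pv_frame_iff (cs : List Char) (f : Int) (hf : f = 0 ∨ f = 1 ∨ f = 2) :
    ((PySem.List.pyRange f (cs.length : Int) 3).any (pvIsStop cs) = true)
      ↔ ∃ i ∈ PySem.List.pyRange 0 (cs.length : Int) 1,
          pvIsStop cs i = true ∧ PySem.Int.mod i 3 = f := by
  have h3 : (0:Int) < 3 := by norm_num
  simp only [List.any_eq_true, PySem.List.mem_pyRange_iff_of_pos h3,
    PySem.List.mem_pyRange_one]
  constructor
  · rintro ⟨i, ⟨hfi, hin, k, hk⟩, hs⟩
    refine ⟨i, ⟨by omega, hin⟩, hs, ?_⟩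
    have := PySem.Int.mod_eq_emod_of_pos (a := i) h3
    rw [this]; omega
  · rintro ⟨i, ⟨h0, hin⟩, hs, hm⟩
    have := PySem.Int.mod_eq_emod_of_pos (a := i) h3
    rw [this] at hm
    refine ⟨i, ⟨?_, hin, ?_⟩, hs⟩
    · omega
    · exact ⟨(i - f) / 3, by omega⟩

theorem cut_firstfew_agree (seq : String) :
    cut_firstfew seq = cut_firstfew_alt seq := by
  simp only [cut_firstfew, cut_firstfew_alt, pvScanA_eq]
  set cs := seq.toList with hcs
  have hcont : ∀ f : Int, f = 0 ∨ f = 1 ∨ f = 2 →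
      (PySem.Set.contains
        ((PySem.List.pyRange 0 (cs.length : Int) 1).foldl
          (fun s i => if pvIsStop cs i then PySem.Set.add s (PySem.Int.mod i 3) else s)
          PySem.Set.empty) f)
      = (PySem.List.pyRange f (cs.length : Int) 3).any (pvIsStop cs) := by
    intro f hf
    rw [Bool.eq_iff_iff, PySem.Set.contains_iff, pv_mem_foldl, pv_frame_iff cs f hf]
    simp [PySem.Set.empty]
  simp only [List.filter_cons, List.filter_nil]
  rw [hcont 0 (by norm_num), hcont 1 (by norm_num), hcont 2 (by norm_num)]
  by_cases h0 : (PySem.List.pyRange 0 (cs.length : Int) 3).any (pvIsStop cs) = true <;>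
  by_cases h1 : (PySem.List.pyRange 1 (cs.length : Int) 3).any (pvIsStop cs) = true <;>
  by_cases h2 : (PySem.List.pyRange 2 (cs.length : Int) 3).any (pvIsStop cs) = true <;>
    (simp only [h0, h1, h2, if_true, if_false, Bool.false_eq_true, Bool.not_true,
      Bool.not_false]) <;> decide

-- ===== VERDICT (by name: the statement is the Claim_ definition above) =====
theorem cut_firstfew_spec : Claim_equal_cut_firstfew := by
  intro seq _ _
  unfold Spec_cut_firstfew
  exact cut_firstfew_agree seq
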